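-- pv_equiv track=rewrite | github.com/KleinerBaum/cs | core/regex_fields.py | _match_mapping
-- ===== SOURCE A (Python) =====
-- from typing import Iterable
--
-- def _match_mapping(value: str, mapping: Iterable[tuple[str, str]]) -> str | None:
--     lowered = value.lower()
--     best: tuple[int, str] | None = None
--     for cue, label in mapping:
--         index = lowered.find(cue)
--         if index != -1:
--             if best is None or index < best[0]:
--                 best = (index, label)
--     if best:
--         return best[1]
--     return None
-- ===== SOURCE B (Python) =====
-- def _match_mapping(value, mapping):
--     # Keep only cues that occur at all, then walk positions left to right and
--     # return the first kept entry (in mapping order) whose cue starts at the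
--     # current position: the earliest-starting cue wins, mapping order breaks ties.
--     lowered = value.lower()
--     hits = [(cue, label) for cue, label in mapping if cue in lowered]
--     if not hits:
--         return None
--     for i in range(len(lowered) + 1):
--         for cue, label in hits:
--             if lowered.startswith(cue, i):
--                 return label
--     return None
-- ===== Notes on version B (the rewrite author's own statement) =====
-- stated objective: alternative
-- what changed: Replaces A's per-cue str.find plus running-minimum fold by a membership prefilter (keep only cues that occur, bail out if none does) followed by a left-to-right position scan of the lowered value that returns at the first position where any kept cue starts, mapping order breaking ties, so no start indices are ever computed or compared.
import Mathlib
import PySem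

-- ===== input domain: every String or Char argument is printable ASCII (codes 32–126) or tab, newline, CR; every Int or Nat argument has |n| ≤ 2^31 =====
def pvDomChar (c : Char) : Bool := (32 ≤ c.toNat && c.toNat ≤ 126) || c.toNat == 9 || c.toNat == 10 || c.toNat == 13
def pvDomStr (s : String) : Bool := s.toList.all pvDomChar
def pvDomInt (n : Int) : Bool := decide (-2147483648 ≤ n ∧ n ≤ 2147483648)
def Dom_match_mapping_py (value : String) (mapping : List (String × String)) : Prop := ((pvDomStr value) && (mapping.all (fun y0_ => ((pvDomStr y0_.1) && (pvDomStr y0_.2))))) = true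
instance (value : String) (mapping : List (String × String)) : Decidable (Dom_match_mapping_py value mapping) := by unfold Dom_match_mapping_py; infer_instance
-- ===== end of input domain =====

-- B replaces A's per-cue find/min-index fold by a membership prefilter followed by a
-- left-to-right position scan that returns at the first position where some kept cue
-- starts (mapping order breaks ties): an alternative decomposition.

-- ===== PORT A =====
-- A-side helper: the body of A's for-loop (the best-update step), extracted as a named function
def pvStepA (lowered : String) (best : Option (Int × String)) (p : String × String) : Option (Int × String) :=
  let index := PySem.Str.find lowered p.1
  if index ≠ -1 then
    match best with
    | none => some (index, p.2)
    | some b => if index < b.1 then some (index, p.2) else some b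
  else best

def match_mapping_py (value : String) (mapping : List (String × String)) : Option String :=
  let lowered := PySem.Str.lower value
  match mapping.foldl (pvStepA lowered) none with
  | some b => some b.2
  | none => none

-- ===== PORT B =====
-- hand port of Python's 'lowered.startswith(cue, i)' (PySem.Str.startswith takes no start
-- argument): for 0 ≤ i — the only calls made here, i ∈ range(n+1) — CPython tests whether
-- cue is a prefix of lowered[i:], which is exactly startswith on the dropped list.
def pvStartswithFrom (s cue : String) (i : Int) : Bool :=
  PySem.Chars.startswith (s.toList.drop i.toNat) cue.toList

-- inner loop: 'for cue, label in mapping: if lowered.startswith(cue, i): return label'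
def pvAltCues (lowered : String) (i : Int) : List (String × String) → Option String
  | [] => none
  | (cue, label) :: rest =>
    if pvStartswithFrom lowered cue i then some label
    else pvAltCues lowered i rest

-- outer loop: 'for i in range(n + 1): …' with the early return
def pvAltPos (lowered : String) (mapping : List (String × String)) : List Int → Option String
  | [] => none
  | i :: rest =>
    match pvAltCues lowered i mapping with
    | some label => some label
    | none => pvAltPos lowered mapping rest

def match_mapping_py_alt (value : String) (mapping : List (String × String)) : Option String :=
  let lowered := PySem.Str.lower value
  let hits := mapping.filter (fun p => PySem.Str.isIn p.1 lowered)
  if hits = [] then none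
  else pvAltPos lowered hits (PySem.List.pyRange 0 (PySem.Str.len lowered + 1) 1)

-- ===== PRECONDITION & SPEC =====
def Spec_match_mapping_py (value : String) (mapping : List (String × String)) (out : Option String) : Prop := out = match_mapping_py_alt value mapping
instance (value : String) (mapping : List (String × String)) (out : Option String) : Decidable (Spec_match_mapping_py value mapping out) := by unfold Spec_match_mapping_py; infer_instance

-- ===== CLAIM (what is proved, stated in full; the proofs are below) =====
def Claim_equal_match_mapping_py : Prop := ∀ (value : String) (mapping : List (String × String)), Dom_match_mapping_py value mapping → Spec_match_mapping_py value mapping (match_mapping_py value mapping)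

-- ===== LEMMAS AND PROOFS =====

-- 'cue occurs in s starting at position j'
def pvMatchAt (s cue : String) (j : Nat) : Prop := cue.toList <+: s.toList.drop j

-- B's startswith test is exactly pvMatchAt
lemma pvStarts_iff (s cue : String) (j : Nat) :
    (pvStartswithFrom s cue (j:Int) = true) ↔ pvMatchAt s cue j := by
  unfold pvStartswithFrom pvMatchAt
  rw [Int.toNat_natCast]
  exact PySem.Chars.startswith_iff _ _

-- a match at j forces 0 ≤ find ≤ j (find is the first occurrence)
lemma pvFind_le (s cue : String) (j : Nat) (h : pvMatchAt s cue j) :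
    0 ≤ PySem.Str.find s cue ∧ PySem.Str.find s cue ≤ (j:Int) := by
  rw [PySem.Str.find_eq]
  have hne : PySem.Chars.find s.toList cue.toList ≠ -1 := by
    rw [PySem.Chars.find_ne_neg_one_iff]
    exact (PySem.Chars.isIn_iff_infix _ _).mp
      ((PySem.Chars.exists_prefix_drop_iff_isIn _ _).mp ⟨j, h⟩)
  have hge := PySem.Chars.neg_one_le_find s.toList cue.toList
  have h0 : 0 ≤ PySem.Chars.find s.toList cue.toList := by omega
  refine ⟨h0, ?_⟩
  by_contra hlt
  exact ((PySem.Chars.find_spec h0).2 j (by omega)) h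

-- find s cue = j exactly when cue matches at j and at no earlier position
lemma pvFind_eq_iff (s cue : String) (j : Nat) :
    PySem.Str.find s cue = (j:Int) ↔ pvMatchAt s cue j ∧ ∀ i < j, ¬ pvMatchAt s cue i := by
  constructor
  · intro h
    have h0 : 0 ≤ PySem.Chars.find s.toList cue.toList := by rw [PySem.Str.find_eq] at h; omega
    have hs := PySem.Chars.find_spec h0
    rw [PySem.Str.find_eq] at h
    constructor
    · have : (PySem.Chars.find s.toList cue.toList).toNat = j := by omega
      unfold pvMatchAt; rw [← this]; exact hs.1
    · intro i hi
      exact hs.2 i (by omega)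
  · rintro ⟨hm, hmin⟩
    obtain ⟨h0, hle⟩ := pvFind_le s cue j hm
    rw [PySem.Str.find_eq] at h0 hle ⊢
    have hs := PySem.Chars.find_spec h0
    by_contra hne
    have hlt : (PySem.Chars.find s.toList cue.toList).toNat < j := by omega
    exact hmin _ hlt hs.1

-- ----- A-side fold characterisation -----

lemma pvFoldA_none (s : String) (m : List (String × String))
    (h : ∀ q ∈ m, PySem.Str.find s q.1 = -1) :
    m.foldl (pvStepA s) none = none := by
  induction m with
  | nil => rfl
  | cons q m ih =>
    have hq := h q (by simp)
    rw [List.foldl_cons]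
    rw [PySem.Str.find_eq] at hq
    have hstep : pvStepA s none q = none := by simp [pvStepA, hq]
    rw [hstep]
    exact ih (fun r hr => h r (by simp [hr]))

lemma pvFoldA_keep (s : String) (m : List (String × String)) (j : Int) (lab : String)
    (h : ∀ q ∈ m, PySem.Str.find s q.1 = -1 ∨ j ≤ PySem.Str.find s q.1) :
    m.foldl (pvStepA s) (some (j, lab)) = some (j, lab) := by
  induction m with
  | nil => rfl
  | cons q m ih =>
    have hq := h q (by simp)
    rw [List.foldl_cons]
    have hstep : pvStepA s (some (j, lab)) q = some (j, lab) := by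
      simp only [pvStepA]
      split_ifs with h1 h2
      · omega
      · rfl
      · rfl
    rw [hstep]
    exact ih (fun r hr => h r (by simp [hr]))

lemma pvFoldA_gt (s : String) (m : List (String × String)) (j : Int) (hj : 0 ≤ j)
    (h : ∀ q ∈ m, PySem.Str.find s q.1 = -1 ∨ j < PySem.Str.find s q.1) :
    ∀ b, (b = none ∨ ∃ x, b = some x ∧ j < x.1) →
      (m.foldl (pvStepA s) b = none ∨ ∃ x, m.foldl (pvStepA s) b = some x ∧ j < x.1) := by
  induction m with
  | nil => intro b hb; simpa using hb
  | cons q m ih =>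
    intro b hb
    have hq := h q (by simp)
    rw [List.foldl_cons]
    apply ih (fun r hr => h r (by simp [hr]))
    rw [PySem.Str.find_eq] at hq
    rcases hq with hq | hq
    · have : pvStepA s b q = b := by simp [pvStepA, hq]
      rw [this]; exact hb
    · rcases hb with hb | ⟨x, hb, hx⟩
      · subst hb
        right
        refine ⟨(PySem.Chars.find s.toList q.1.toList, q.2), ?_, hq⟩
        simp only [pvStepA, PySem.Str.find_eq]
        split_ifs with h1
        · rfl
        · omega
      · subst hb
        simp only [pvStepA, PySem.Str.find_eq]
        split_ifs with h1 h2
        · exact Or.inr ⟨_, rfl, hq⟩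
        · exact Or.inr ⟨x, rfl, hx⟩
        · exact Or.inr ⟨x, rfl, hx⟩

lemma pvFoldA_char (s : String) (m1 m2 : List (String × String)) (p : String × String) (j : Nat)
    (h1 : ∀ q ∈ m1, PySem.Str.find s q.1 = -1 ∨ (j:Int) < PySem.Str.find s q.1)
    (hp : PySem.Str.find s p.1 = (j:Int))
    (h2 : ∀ q ∈ m2, PySem.Str.find s q.1 = -1 ∨ (j:Int) ≤ PySem.Str.find s q.1) :
    (m1 ++ p :: m2).foldl (pvStepA s) none = some ((j:Int), p.2) := by
  rw [List.foldl_append, List.foldl_cons]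
  have hjne : ((j:Int)) ≠ -1 := by omega
  rw [PySem.Str.find_eq] at hp
  rcases pvFoldA_gt s m1 (j:Int) (by omega) h1 none (Or.inl rfl) with hb | ⟨x, hb, hx⟩
  · rw [hb]
    have hstep : pvStepA s none p = some ((j:Int), p.2) := by
      simp [pvStepA, hp, hjne]
    rw [hstep]
    exact pvFoldA_keep s m2 _ _ h2
  · rw [hb]
    have hstep : pvStepA s (some x) p = some ((j:Int), p.2) := by
      simp only [pvStepA, PySem.Str.find_eq, hp]
      split_ifs
      · rfl
    rw [hstep]
    exact pvFoldA_keep s m2 _ _ h2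

-- ----- B-side inner-loop characterisation -----

lemma pvAltCues_none_iff (s : String) (j : Nat) (m : List (String × String)) :
    pvAltCues s (j:Int) m = none ↔ ∀ p ∈ m, ¬ pvMatchAt s p.1 j := by
  induction m with
  | nil => simp [pvAltCues]
  | cons p m ih =>
    obtain ⟨cue, lab⟩ := p
    by_cases hc : pvStartswithFrom s cue (j:Int) = true
    · simp only [pvAltCues, if_pos hc]
      constructor
      · intro h; exact absurd h (by simp)
      · intro h
        exact absurd ((pvStarts_iff s cue j).mp hc) (h (cue, lab) (by simp))
    · simp only [pvAltCues, if_neg hc]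
      rw [ih]
      constructor
      · intro h q hq
        rcases List.mem_cons.mp hq with rfl | hq
        · exact fun hm => hc ((pvStarts_iff s cue j).mpr hm)
        · exact h q hq
      · intro h q hq
        exact h q (List.mem_cons_of_mem _ hq)

lemma pvAltCues_some (s : String) (j : Nat) (m : List (String × String)) (lab : String)
    (h : pvAltCues s (j:Int) m = some lab) :
    ∃ m1 p m2, m = m1 ++ p :: m2 ∧ p.2 = lab ∧ pvMatchAt s p.1 j ∧
      ∀ q ∈ m1, ¬ pvMatchAt s q.1 j := by
  induction m with
  | nil => simp [pvAltCues] at h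
  | cons p m ih =>
    obtain ⟨cue, l2⟩ := p
    by_cases hc : pvStartswithFrom s cue (j:Int) = true
    · simp only [pvAltCues, if_pos hc, Option.some.injEq] at h
      exact ⟨[], (cue, l2), m, rfl, h, (pvStarts_iff s cue j).mp hc, by simp⟩
    · simp only [pvAltCues, if_neg hc] at h
      obtain ⟨m1, p, m2, hm, hlab, hmatch, hnone⟩ := ih h
      refine ⟨(cue, l2) :: m1, p, m2, by simp [hm], hlab, hmatch, ?_⟩
      intro q hq
      rcases List.mem_cons.mp hq with rfl | hq
      · exact fun hm' => hc ((pvStarts_iff s cue j).mpr hm')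
      · exact hnone q hq

-- ----- the main induction: positions j..n against A's fold -----

lemma pvMain (s : String) (m : List (String × String)) :
    ∀ k j, j + k = s.toList.length + 1 →
      (∀ q ∈ m, PySem.Str.find s q.1 = -1 ∨ (j:Int) ≤ PySem.Str.find s q.1) →
      pvAltPos s m (PySem.List.pyRange (j:Int) ((s.toList.length:Int) + 1) 1) =
        (m.foldl (pvStepA s) none).map (·.2) := by
  intro k
  induction k with
  | zero =>
    intro j hj h
    rw [PySem.List.pyRange_one_eq_nil (by omega)]
    have hall : ∀ q ∈ m, PySem.Str.find s q.1 = -1 := by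
      intro q hq
      have hle : PySem.Str.find s q.1 ≤ (s.toList.length : Int) := by
        rw [PySem.Str.find_eq]; exact PySem.Chars.find_le_length _ _
      rcases h q hq with h' | h' <;> omega
    rw [pvFoldA_none s m hall]
    rfl
  | succ k ih =>
    intro j hj h
    rw [PySem.List.pyRange_one_cons (by omega)]
    cases hcue : pvAltCues s (j:Int) m with
    | none =>
      have hstep : pvAltPos s m ((j:Int) :: PySem.List.pyRange ((j:Int) + 1) ((s.toList.length:Int) + 1) 1) =
          pvAltPos s m (PySem.List.pyRange ((j:Int) + 1) ((s.toList.length:Int) + 1) 1) := by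
        simp [pvAltPos, hcue]
      rw [hstep]
      have hcast : ((j:Int) + 1) = ((j + 1 : Nat) : Int) := by push_cast; ring
      rw [hcast]
      apply ih (j + 1) (by omega)
      intro q hq
      have hnm := (pvAltCues_none_iff s j m).mp hcue q hq
      rcases h q hq with h' | h'
      · exact Or.inl h'
      · right
        have : PySem.Str.find s q.1 ≠ (j:Int) := by
          intro he
          exact hnm ((pvFind_eq_iff s q.1 j).mp he).1
        push_cast
        omega
    | some lab =>
      have hstep : pvAltPos s m ((j:Int) :: PySem.List.pyRange ((j:Int) + 1) ((s.toList.length:Int) + 1) 1) =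
          some lab := by
        simp [pvAltPos, hcue]
      rw [hstep]
      obtain ⟨m1, p, m2, hm, hlab, hmatch, hnone⟩ := pvAltCues_some s j m lab hcue
      have hp : PySem.Str.find s p.1 = (j:Int) := by
        obtain ⟨h0, hle⟩ := pvFind_le s p.1 j hmatch
        have hq : p ∈ m := by rw [hm]; simp
        rcases h p hq with h' | h' <;> omega
      have h1 : ∀ q ∈ m1, PySem.Str.find s q.1 = -1 ∨ (j:Int) < PySem.Str.find s q.1 := by
        intro q hq
        have hqm : q ∈ m := by rw [hm]; simp [hq]
        have hne : PySem.Str.find s q.1 ≠ (j:Int) := by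
          intro he
          exact hnone q hq ((pvFind_eq_iff s q.1 j).mp he).1
        rcases h q hqm with h' | h'
        · exact Or.inl h'
        · right; omega
      have h2 : ∀ q ∈ m2, PySem.Str.find s q.1 = -1 ∨ (j:Int) ≤ PySem.Str.find s q.1 := by
        intro q hq
        exact h q (by rw [hm]; simp [hq])
      rw [hm, pvFoldA_char s m1 m2 p j h1 hp h2]
      simp [hlab]

-- cues that never occur have find = -1, so A's fold ignores them: folding over the
-- membership-filtered mapping gives the same best tuple
lemma pvFoldA_filter (s : String) (m : List (String × String)) :
    ∀ b, m.foldl (pvStepA s) b = (m.filter (fun p => PySem.Str.isIn p.1 s)).foldl (pvStepA s) b := by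
  induction m with
  | nil => intro b; rfl
  | cons q m ih =>
    intro b
    by_cases hq : PySem.Str.isIn q.1 s = true
    · rw [List.filter_cons_of_pos (by simpa using hq), List.foldl_cons, List.foldl_cons, ih]
    · have hfind : PySem.Chars.find s.toList q.1.toList = -1 := by
        rw [PySem.Chars.find_eq_neg_one_iff]
        rw [PySem.Str.isIn_eq] at hq
        exact (PySem.Chars.isIn_eq_false_iff _ _).mp (by simpa using hq)
      have hstep : pvStepA s b q = b := by simp [pvStepA, hfind]
      rw [List.filter_cons_of_neg (by simpa using hq), List.foldl_cons, hstep, ih]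

-- ===== VERDICT (by name: the statement is the Claim_ definition above) =====
theorem match_mapping_py_spec : Claim_equal_match_mapping_py := by
  intro value mapping _
  show match_mapping_py value mapping = match_mapping_py_alt value mapping
  have hmain := pvMain (PySem.Str.lower value)
    (mapping.filter (fun p => PySem.Str.isIn p.1 (PySem.Str.lower value)))
    ((PySem.Str.lower value).toList.length + 1) 0 (by omega)
    (by
      intro q hq
      have := PySem.Chars.neg_one_le_find (PySem.Str.lower value).toList q.1.toList
      rw [PySem.Str.find_eq]
      omega)
  simp only [Nat.cast_zero] at hmain
  simp only [match_mapping_py, match_mapping_py_alt, PySem.Str.len_eq]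
  rw [pvFoldA_filter (PySem.Str.lower value) mapping none, hmain]
  by_cases hnil : mapping.filter (fun p => PySem.Str.isIn p.1 (PySem.Str.lower value)) = []
  · rw [hnil]; rfl
  · rw [if_neg hnil]
    cases (mapping.filter (fun p => PySem.Str.isIn p.1 (PySem.Str.lower value))).foldl
        (pvStepA (PySem.Str.lower value)) none with
    | none => rfl
    | some b => rfl
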